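-- pv_equiv track=rewrite | github.com/VaHiX/CodeForces | Python/ByTier/F/1895_F_Fancy_Arrays.py | solve
-- ===== SOURCE A (Python) =====
-- mod = 10**9 + 7
--
-- def mat_mul(X, Y):
--     # Multiply two matrices X and Y modulo mod
--     n, m = len(X), len(Y[0])
--     res = [[0 for j in range(m)] for i in range(n)]
--     for i in range(n):
--         for j in range(m):
--             for k in range(len(Y)):
--                 res[i][j] += X[i][k] * Y[k][j]
--                 res[i][j] %= mod
--     return res
--
-- def solve(n, k, x):
--     mod = 10**9 + 7
--     # Base case: All arrays of length n-1 where each element is in [0, 2k]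
--     # Multiply by (x + k) since first element can be in [0, x + k]
--     res = pow(2 * k + 1, n - 1, mod) * (x + k) % mod
--
--     if x == 0:
--         # If x is 0, then all values are valid from 0 to k-1, so we don't subtract anything
--         return res
--
--     # Create transition matrix A for states [0, x-1]
--     # A[i][j] = 1 means we can go from state i to state j with difference at most k
--     A = [[0] * x for i in range(x)]
--     for i in range(x):
--         for j in range(x):
--             if abs(i - j) <= k:
--                 A[i][j] = 1
--
--     # Identity matrix for exponentiation
--     E = [[1] for _ in range(x)]
--     t = n - 1
--     while t:
--         if t & 1:
--             E = mat_mul(A, E)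
--         A = mat_mul(A, A)
--         t >>= 1
--
--     # Subtract invalid paths (no value from [x, x+k-1] appears)
--     for i in range(x):
--         res -= E[i][0]
--         res %= mod
--
--     return res
-- ===== SOURCE B (Python) =====
-- mod = 10**9 + 7
--
-- def solve(n, k, x):
--     mod = 10**9 + 7
--     res = pow(2 * k + 1, n - 1, mod) * (x + k) % mod
--     if x == 0:
--         return res
--
--     band = [[1 if abs(i - j) <= k else 0 for j in range(x)] for i in range(x)]
--
--     def mul(P, Q):
--         return [[sum(P[i][l] * Q[l][j] for l in range(x)) % mod for j in range(x)]
--                 for i in range(x)]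
--
--     def mpow(t):
--         # band^t, top-down: square the half power, right-multiply by band on odd t
--         if t == 0:
--             return [[1 if i == j else 0 for j in range(x)] for i in range(x)]
--         h = mpow(t // 2)
--         h2 = mul(h, h)
--         return mul(h2, band) if t % 2 == 1 else h2
--
--     walks = mpow(n - 1)
--     return (res - sum(map(sum, walks))) % mod
-- ===== Notes on version B (the rewrite author's own statement) =====
-- stated objective: alternative
-- what changed: A exponentiates bottom-up over the bits of n-1, squaring the matrix in place while left-multiplying an all-ones column vector on set bits with a mod after every addition, then subtracts the vector entries one by one; B computes band^(n-1) by a top-down recursion (identity base, square the half power, right-multiply by the band matrix on odd exponents, a single mod per entry) and subtracts the grand total of that power matrix in one step.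
-- outside the precondition, e.g. on solve(0, 1, 0): A returns 333333336, B returns 333333336; on solve(1, 2, -3): A returns 1000000006, B returns 1000000006
import Mathlib
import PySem

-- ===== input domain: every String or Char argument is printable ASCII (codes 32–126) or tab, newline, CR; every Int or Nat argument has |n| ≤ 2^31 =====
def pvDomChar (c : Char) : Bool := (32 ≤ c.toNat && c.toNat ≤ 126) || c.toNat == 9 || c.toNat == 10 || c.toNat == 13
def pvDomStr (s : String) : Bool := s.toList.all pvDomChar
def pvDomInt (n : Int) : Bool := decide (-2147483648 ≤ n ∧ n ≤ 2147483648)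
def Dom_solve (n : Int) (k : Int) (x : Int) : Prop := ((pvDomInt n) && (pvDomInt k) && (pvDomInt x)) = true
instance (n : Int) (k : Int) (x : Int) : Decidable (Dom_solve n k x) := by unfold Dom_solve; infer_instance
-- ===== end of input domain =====

-- B replaces A's bottom-up bit-loop (square matrix in place, left-multiply a ones column on set
-- bits, mod after every addition) by a top-down recursive matrix power (identity base, square the
-- half power, right-multiply by the band matrix on odd t, one mod per entry) and subtracts the
-- grand total of that power matrix in one step; A = B is proved on Pre_.


-- ===== PORT A =====
def pmod : Int := 1000000007

-- Python's built-in three-argument pow(b, e, mod) (e ≥ 0), ported as binary modular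
-- exponentiation: PySem.Int.powMod's direct b ^ e is not feasibly evaluable for e near 2^31,
-- while CPython's pow reduces modulo at every step; this computes the same value.
def pmpow (b : Int) (e : Nat) : Int :=
  if e = 0 then 1 % pmod
  else
    let h := pmpow b (e / 2)
    if e % 2 = 1 then h * h % pmod * (b % pmod) % pmod else h * h % pmod
  termination_by e
  decreasing_by all_goals exact Nat.div_lt_self (Nat.pos_of_ne_zero (by assumption)) (by norm_num)

-- helper mat_mul of A: triple loop accumulating (acc + X[i][kk]*Y[kk][j]) % mod;
-- indices produced by range are always in range in A's uses, so getD defaults are never read.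
def mat_mul (X Y : List (List Int)) : List (List Int) :=
  (List.range X.length).map (fun i : Nat =>
    (List.range (Y.headD []).length).map (fun j : Nat =>
      (List.range Y.length).foldl
        (fun acc kk => (acc + ((X.getD i []).getD kk 0) * ((Y.getD kk []).getD j 0)) % pmod) 0))

-- A's `while t:` binary-exponentiation loop (E updated with the old A, then A squared, t halved)
def bexp (A E : List (List Int)) (t : Nat) : List (List Int) :=
  if t = 0 then E
  else bexp (mat_mul A A) (if t % 2 = 1 then mat_mul A E else E) (t / 2)
  termination_by t
  decreasing_by exact Nat.div_lt_self (Nat.pos_of_ne_zero (by assumption)) (by norm_num)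

def solve (n : Int) (k : Int) (x : Int) : Int :=
  let res := pmpow (2 * k + 1) (n - 1).toNat * (x + k) % pmod
  if x = 0 then res
  else
    let A0 := (List.range x.toNat).map (fun i : Nat => (List.range x.toNat).map (fun j : Nat =>
        if |(i : Int) - (j : Int)| ≤ k then (1 : Int) else 0))
    let E := bexp A0 (List.replicate x.toNat [1]) (n - 1).toNat
    (List.range x.toNat).foldl (fun r i => (r - ((E.getD i []).getD 0 0)) % pmod) res

-- ===== PORT B =====
-- B's band matrix: [[1 if abs(i-j) <= k else 0 for j in range(x)] for i in range(x)]
def bband (k : Int) (a : Nat) : List (List Int) :=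
  (List.range a).map (fun i : Nat => (List.range a).map (fun j : Nat =>
    if |(i : Int) - (j : Int)| ≤ k then (1 : Int) else 0))

-- B's mul: one comprehension, a single mod per entry
def bmul (a : Nat) (P Q : List (List Int)) : List (List Int) :=
  (List.range a).map (fun i : Nat => (List.range a).map (fun j : Nat =>
    ((List.range a).map (fun l : Nat => (P.getD i []).getD l 0 * (Q.getD l []).getD j 0)).sum % pmod))

-- B's mpow: top-down recursion, identity base, right-multiply by band on odd t
def bpow (band : List (List Int)) (a : Nat) (t : Nat) : List (List Int) :=
  if t = 0 then
    (List.range a).map (fun i : Nat => (List.range a).map (fun j : Nat =>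
      if i = j then (1 : Int) else 0))
  else
    let h := bpow band a (t / 2)
    let h2 := bmul a h h
    if t % 2 = 1 then bmul a h2 band else h2
  termination_by t
  decreasing_by exact Nat.div_lt_self (Nat.pos_of_ne_zero (by assumption)) (by norm_num)

def solve_alt (n : Int) (k : Int) (x : Int) : Int :=
  let res := pmpow (2 * k + 1) (n - 1).toNat * (x + k) % pmod
  if x = 0 then res
  else
    let walks := bpow (bband k x.toNat) x.toNat (n - 1).toNat
    (res - (walks.map (fun row => row.sum)).sum) % pmod

-- ===== PRECONDITION & SPEC =====
-- Pre_ excludes n ≤ 0 (A's `while t` loop never terminates there when x ≠ 0, and otherwise A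
-- needs Python's negative-exponent modular pow) and x < 0 (A raises IndexError in mat_mul for
-- n ≥ 2; only the degenerate n = 1 corner returns): the natural domain of the problem is n ≥ 1, x ≥ 0.
def Pre_solve (n : Int) (k : Int) (x : Int) : Prop := 1 ≤ n ∧ 0 ≤ x
instance (n : Int) (k : Int) (x : Int) : Decidable (Pre_solve n k x) := by unfold Pre_solve; infer_instance

def pvWitness_solve : Int × Int × Int := (3, 1, 2)

def Spec_solve (n : Int) (k : Int) (x : Int) (out : Int) : Prop := out = solve_alt n k x
instance (n : Int) (k : Int) (x : Int) (out : Int) : Decidable (Spec_solve n k x out) := by unfold Spec_solve; infer_instance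

-- ===== CLAIM (what is proved, stated in full; the proofs are below) =====
def Claim_equal_solve : Prop := ∀ (n : Int) (k : Int) (x : Int), Dom_solve n k x → Pre_solve n k x → Spec_solve n k x (solve n k x)

-- ===== LEMMAS AND PROOFS =====

-- entry of a list matrix (0 outside)
def ent (X : List (List Int)) (i j : Nat) : Int := (X.getD i []).getD j 0

-- X represents the ZMod matrix M (shape r × c, entries congruent mod 10^9+7)
def MRep (X : List (List Int)) (r c : Nat) (M : Matrix (Fin r) (Fin c) (ZMod 1000000007)) : Prop :=
  X.length = r ∧ (∀ row ∈ X, row.length = c) ∧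
  (∀ i j (hi : i < r) (hj : j < c), ((ent X i j : ZMod 1000000007) = M ⟨i, hi⟩ ⟨j, hj⟩))

-- the banded transition matrix both programs use, and the all-ones column
def Mband (k : Int) (a : Nat) : Matrix (Fin a) (Fin a) (ZMod 1000000007) :=
  fun i j => if |((i : Nat) : Int) - ((j : Nat) : Int)| ≤ k then 1 else 0

def Ones (a : Nat) : Matrix (Fin a) (Fin 1) (ZMod 1000000007) := fun _ _ => 1

theorem pmod_pos : (0 : Int) < pmod := by norm_num [pmod]

theorem cast_emod (z : Int) : (((z % pmod) : Int) : ZMod 1000000007) = (z : ZMod 1000000007) := by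
  have h : pmod = ((1000000007 : ℕ) : Int) := by norm_num [pmod]
  rw [h, ZMod.intCast_mod]

theorem int_inj {z1 z2 : Int} (h1 : 0 ≤ z1) (h2 : z1 < pmod) (h3 : 0 ≤ z2) (h4 : z2 < pmod)
    (h : (z1 : ZMod 1000000007) = (z2 : ZMod 1000000007)) : z1 = z2 := by
  have hm := (ZMod.intCast_eq_intCast_iff z1 z2 1000000007).mp h
  unfold Int.ModEq at hm
  simp only [pmod] at h2 h4
  push_cast at hm
  omega

theorem emod_bnd (z : Int) : 0 ≤ z % pmod ∧ z % pmod < pmod :=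
  ⟨Int.emod_nonneg z (by norm_num [pmod]), Int.emod_lt_of_pos z pmod_pos⟩

theorem foldl_add_emod (g : Nat → Int) (init : Int) (a : Nat) (ha : 0 < a) :
    (List.range a).foldl (fun acc l => (acc + g l) % pmod) init
      = (init + ∑ l ∈ Finset.range a, g l) % pmod := by
  induction a with
  | zero => omega
  | succ m ih =>
    rw [List.range_succ, List.foldl_append]
    rcases Nat.eq_zero_or_pos m with h | h
    · subst h; simp
    · rw [ih h]
      simp only [List.foldl_cons, List.foldl_nil, Finset.sum_range_succ, pmod]
      omega

theorem foldl_sub_emod (g : Nat → Int) (init : Int) (a : Nat) (ha : 0 < a) :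
    (List.range a).foldl (fun r i => (r - g i) % pmod) init
      = (init - ∑ i ∈ Finset.range a, g i) % pmod := by
  induction a with
  | zero => omega
  | succ m ih =>
    rw [List.range_succ, List.foldl_append]
    rcases Nat.eq_zero_or_pos m with h | h
    · subst h; simp
    · rw [ih h]
      simp only [List.foldl_cons, List.foldl_nil, Finset.sum_range_succ, pmod]
      omega

theorem list_sum_getD (v : List Int) : v.sum = ∑ i ∈ Finset.range v.length, v.getD i 0 := by
  induction v using List.reverseRecOn with
  | nil => simp
  | append_singleton xs x ih =>
    simp only [List.sum_append, List.length_append, List.sum_cons, List.sum_nil, List.length_cons,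
      List.length_nil, Nat.zero_add, Finset.sum_range_succ, ih, add_zero]
    congr 1
    · exact Finset.sum_congr rfl (fun i hi => by
        rw [List.getD, List.getD, List.getElem?_append_left (by simpa using (Finset.mem_range.mp hi))])
    · rw [List.getD, List.getElem?_append_right (le_refl _)]; simp

-- ----- A-side lemmas -----
theorem ent_mat_mul (X Y : List (List Int)) (i j : Nat) (hi : i < X.length)
    (hj : j < (Y.headD []).length) :
    ent (mat_mul X Y) i j
      = (List.range Y.length).foldl (fun acc kk => (acc + ent X i kk * ent Y kk j) % pmod) 0 := by
  unfold ent mat_mul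
  rw [PySem.List.getD_map_range _ _ _ _ hi, PySem.List.getD_map_range _ _ _ _ hj]

theorem length_mat_mul (X Y : List (List Int)) : (mat_mul X Y).length = X.length := by
  simp [mat_mul]

theorem row_length_mat_mul (X Y : List (List Int)) {row : List Int} (h : row ∈ mat_mul X Y) :
    row.length = (Y.headD []).length := by
  unfold mat_mul at h
  obtain ⟨i, -, rfl⟩ := List.mem_map.mp h
  simp

theorem mat_mul_rep {r s c : Nat} (hs : 0 < s) {X Y : List (List Int)}
    {MX : Matrix (Fin r) (Fin s) (ZMod 1000000007)} {MY : Matrix (Fin s) (Fin c) (ZMod 1000000007)}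
    (hX : MRep X r s MX) (hY : MRep Y s c MY) : MRep (mat_mul X Y) r c (MX * MY) := by
  obtain ⟨hXl, hXr, hXe⟩ := hX
  obtain ⟨hYl, hYr, hYe⟩ := hY
  have hYne : Y ≠ [] := by intro h; rw [h] at hYl; simp at hYl; omega
  have hhead : (Y.headD []).length = c := by
    cases Y with
    | nil => exact absurd rfl hYne
    | cons y ys => exact hYr y (by simp)
  refine ⟨by rw [length_mat_mul, hXl], fun row hrow => by rw [row_length_mat_mul X Y hrow, hhead], ?_⟩
  intro i j hi hj
  rw [ent_mat_mul X Y i j (by omega) (by omega)]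
  rw [hYl, foldl_add_emod _ _ _ hs, cast_emod]
  push_cast
  rw [Matrix.mul_apply]
  have hswap := Fin.sum_univ_eq_sum_range (fun kk : Nat => ((ent X i kk : ZMod 1000000007)) * ((ent Y kk j : ZMod 1000000007))) s
  rw [← hswap, zero_add]
  refine Finset.sum_congr rfl (fun kk _ => ?_)
  rw [hXe i kk hi kk.isLt, hYe kk j kk.isLt hj]

theorem bexp_rep {a : Nat} (ha : 0 < a) :
    ∀ (t : Nat) {A E : List (List Int)} {MA : Matrix (Fin a) (Fin a) (ZMod 1000000007)}
      {ME : Matrix (Fin a) (Fin 1) (ZMod 1000000007)},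
      MRep A a a MA → MRep E a 1 ME → MRep (bexp A E t) a 1 (MA ^ t * ME) := by
  intro t
  induction t using Nat.strong_induction_on with
  | _ t ih =>
    intro A E MA ME hA hE
    rw [bexp]
    by_cases h0 : t = 0
    · subst h0; simpa [pow_zero, one_mul] using hE
    · rw [if_neg h0]
      have ht2 : t / 2 < t := Nat.div_lt_self (Nat.pos_of_ne_zero h0) (by norm_num)
      have hAA := mat_mul_rep ha hA hA
      by_cases hodd : t % 2 = 1
      · rw [if_pos hodd]
        have hres := ih (t / 2) ht2 hAA (mat_mul_rep ha hA hE)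
        have hmat : (MA * MA) ^ (t / 2) * (MA * ME) = MA ^ t * ME := by
          rw [← pow_two, ← pow_mul, ← Matrix.mul_assoc, ← pow_succ]
          congr 2
          omega
        rwa [hmat] at hres
      · rw [if_neg hodd]
        have hres := ih (t / 2) ht2 hAA hE
        have hmat : (MA * MA) ^ (t / 2) * ME = MA ^ t * ME := by
          rw [← pow_two, ← pow_mul]
          congr 2
          omega
        rwa [hmat] at hres

theorem A0_rep (k : Int) (a : Nat) :
    MRep ((List.range a).map (fun i : Nat => (List.range a).map (fun j : Nat =>
        if |(i : Int) - (j : Int)| ≤ k then (1 : Int) else 0))) a a (Mband k a) := by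
  refine ⟨by simp, ?_, ?_⟩
  · intro row hrow
    obtain ⟨i, -, rfl⟩ := List.mem_map.mp hrow
    simp
  · intro i j hi hj
    unfold ent
    rw [PySem.List.getD_map_range _ _ _ _ hi, PySem.List.getD_map_range _ _ _ _ hj, Mband]
    by_cases hband : |(i : Int) - (j : Int)| ≤ k
    · rw [if_pos hband, if_pos hband, Int.cast_one]
    · rw [if_neg hband, if_neg hband, Int.cast_zero]

theorem E0_rep (a : Nat) : MRep (List.replicate a ([1] : List Int)) a 1 (Ones a) := by
  refine ⟨by simp, ?_, ?_⟩
  · intro row hrow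
    rw [(List.eq_of_mem_replicate hrow : row = [1])]
    rfl
  · intro i j hi hj
    unfold ent
    simp only [List.getD_eq_getElem?_getD, List.getElem?_replicate, if_pos hi]
    interval_cases j
    simp [Ones]

-- ----- B-side lemmas -----
theorem bband_rep (k : Int) (a : Nat) : MRep (bband k a) a a (Mband k a) := A0_rep k a

theorem bmul_rep {a : Nat} {P Q : List (List Int)}
    {MP MQ : Matrix (Fin a) (Fin a) (ZMod 1000000007)}
    (hP : MRep P a a MP) (hQ : MRep Q a a MQ) : MRep (bmul a P Q) a a (MP * MQ) := by
  obtain ⟨hPl, hPr, hPe⟩ := hP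
  obtain ⟨hQl, hQr, hQe⟩ := hQ
  refine ⟨by simp [bmul], ?_, ?_⟩
  · intro row hrow
    obtain ⟨i, -, rfl⟩ := List.mem_map.mp hrow
    simp
  · intro i j hi hj
    unfold ent bmul
    rw [PySem.List.getD_map_range _ _ _ _ hi, PySem.List.getD_map_range _ _ _ _ hj, cast_emod]
    have hlist : ((List.range a).map (fun l : Nat => (P.getD i []).getD l 0 * (Q.getD l []).getD j 0)).sum
        = ∑ l ∈ Finset.range a, ent P i l * ent Q l j := rfl
    rw [hlist]
    push_cast
    rw [Matrix.mul_apply]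
    have hswap := Fin.sum_univ_eq_sum_range (fun l : Nat => ((ent P i l : ZMod 1000000007)) * ((ent Q l j : ZMod 1000000007))) a
    rw [← hswap]
    refine Finset.sum_congr rfl (fun l _ => ?_)
    rw [hPe i l hi l.isLt, hQe l j l.isLt hj]

theorem bI_rep (a : Nat) :
    MRep ((List.range a).map (fun i : Nat => (List.range a).map (fun j : Nat =>
      if i = j then (1 : Int) else 0))) a a 1 := by
  refine ⟨by simp, ?_, ?_⟩
  · intro row hrow
    obtain ⟨i, -, rfl⟩ := List.mem_map.mp hrow
    simp
  · intro i j hi hj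
    unfold ent
    rw [PySem.List.getD_map_range _ _ _ _ hi, PySem.List.getD_map_range _ _ _ _ hj]
    rw [Matrix.one_apply]
    by_cases hij : i = j
    · rw [if_pos hij, if_pos (by simp [hij]), Int.cast_one]
    · rw [if_neg hij, if_neg (by simp [hij]), Int.cast_zero]

theorem bpow_rep {a : Nat} {band : List (List Int)} {M : Matrix (Fin a) (Fin a) (ZMod 1000000007)}
    (hband : MRep band a a M) : ∀ (t : Nat), MRep (bpow band a t) a a (M ^ t) := by
  intro t
  induction t using Nat.strong_induction_on with
  | _ t ih =>
    rw [bpow]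
    by_cases h0 : t = 0
    · rw [if_pos h0, h0, pow_zero]
      exact bI_rep a
    · rw [if_neg h0]
      have ht2 : t / 2 < t := Nat.div_lt_self (Nat.pos_of_ne_zero h0) (by norm_num)
      have hh := ih (t / 2) ht2
      have hh2 := bmul_rep hh hh
      by_cases hodd : t % 2 = 1
      · rw [if_pos hodd]
        have hres := bmul_rep hh2 hband
        have hmat : M ^ (t / 2) * M ^ (t / 2) * M = M ^ t := by
          rw [← pow_add, ← pow_succ]
          congr 1
          omega
        rwa [hmat] at hres
      · rw [if_neg hodd]
        have hmat : M ^ (t / 2) * M ^ (t / 2) = M ^ t := by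
          rw [← pow_add]
          congr 1
          omega
        rwa [hmat] at hh2

-- grand total of a well-shaped list matrix as a double sum of entries
theorem map_sum_sum {R : List (List Int)} {a : Nat} (hlen : R.length = a)
    (hrow : ∀ row ∈ R, row.length = a) :
    (R.map (fun row => row.sum)).sum = ∑ i ∈ Finset.range a, ∑ j ∈ Finset.range a, ent R i j := by
  rw [list_sum_getD (R.map (fun row => row.sum))]
  simp only [List.length_map, hlen]
  refine Finset.sum_congr rfl (fun i hi => ?_)
  have hia : i < a := Finset.mem_range.mp hi
  have hmem : R.getD i [] ∈ R := by
    rw [List.getD_eq_getElem?_getD, List.getElem?_eq_getElem (by omega)]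
    exact List.getElem_mem _
  have hget : (R.map (fun row => row.sum)).getD i 0 = (R.getD i []).sum := by
    simp only [List.getD_eq_getElem?_getD, List.getElem?_map]
    rw [List.getElem?_eq_getElem (by omega)]
    simp
  rw [hget, list_sum_getD (R.getD i []), hrow _ hmem]
  rfl

theorem solve_equals_alt (n k x : Int) (hn : 1 ≤ n) (hx : 0 ≤ x) : solve n k x = solve_alt n k x := by
  by_cases hx0 : x = 0
  · simp [solve, solve_alt, hx0]
  · have ha : 0 < x.toNat := by omega
    simp only [solve, solve_alt, if_neg hx0]
    set a := x.toNat with hadef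
    set t := (n - 1).toNat with htdef
    set res := pmpow (2 * k + 1) t * (x + k) % pmod with hres
    set E := bexp ((List.range a).map (fun i : Nat => (List.range a).map (fun j : Nat =>
        if |(i : Int) - (j : Int)| ≤ k then (1 : Int) else 0))) (List.replicate a [1]) t with hE
    set R := bpow (bband k a) a t with hR
    have hErep : MRep E a 1 ((Mband k a) ^ t * Ones a) := bexp_rep ha t (A0_rep k a) (E0_rep a)
    have hRrep : MRep R a a ((Mband k a) ^ t) := bpow_rep (bband_rep k a) t
    rw [foldl_sub_emod (fun i => ((E.getD i []).getD 0 0)) res a ha]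
    rw [map_sum_sum hRrep.1 hRrep.2.1]
    apply int_inj (emod_bnd _).1 (emod_bnd _).2 (emod_bnd _).1 (emod_bnd _).2
    rw [cast_emod, cast_emod]
    push_cast
    congr 1
    refine Finset.sum_congr rfl (fun i hi => ?_)
    have hia : i < a := Finset.mem_range.mp hi
    have h1 : (((E.getD i []).getD 0 0 : Int) : ZMod 1000000007)
        = ((Mband k a) ^ t * Ones a) ⟨i, hia⟩ ⟨0, by norm_num⟩ := hErep.2.2 i 0 hia (by norm_num)
    rw [h1, Matrix.mul_apply]
    have hswap := Fin.sum_univ_eq_sum_range (fun j : Nat => ((ent R i j : Int) : ZMod 1000000007)) a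
    rw [← hswap]
    refine Finset.sum_congr rfl (fun j _ => ?_)
    rw [hRrep.2.2 i j hia j.isLt]
    simp [Ones]

-- ===== VERDICT (by name: the statement is the Claim_ definition above) =====
theorem solve_spec : Claim_equal_solve := by
  intro n k x _ hpre
  unfold Spec_solve
  exact solve_equals_alt n k x hpre.1 hpre.2
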